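-- pv_equiv track=rewrite | github.com/Mahynlo/pdf_manager | src/pdf_merge/tab.py | _selection_to_range
-- ===== SOURCE A (Python) =====
-- def _selection_to_range(selected: list[bool]) -> str:
--     """Boolean list → compact 1-based range string, e.g. '1-5, 8, 10-15'."""
--     pages = [i + 1 for i, s in enumerate(selected) if s]
--     if not pages:
--         return ""
--     ranges: list[str] = []
--     start = end = pages[0]
--     for p in pages[1:]:
--         if p == end + 1:
--             end = p
--         else:
--             ranges.append(str(start) if start == end else f"{start}-{end}")
--             start = end = p
--     ranges.append(str(start) if start == end else f"{start}-{end}")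
--     return ", ".join(ranges)
-- ===== SOURCE B (Python) =====
-- def _selection_to_range(selected: list[bool]) -> str:
--     """Boolean list -> compact 1-based range string, e.g. '1-5, 8, 10-15'."""
--     parts = []
--     n = len(selected)
--     i = 0
--     while i < n:
--         if selected[i]:
--             j = i + 1
--             while j < n and selected[j]:
--                 j += 1
--             parts.append(str(i + 1) if j == i + 1 else f"{i + 1}-{j}")
--             i = j
--         else:
--             i += 1
--     return ", ".join(parts)
-- ===== Notes on version B (the rewrite author's own statement) =====
-- stated objective: alternative
-- what changed: Instead of building a 1-based pages list and running a start/end state machine with a trailing flush, B scans the boolean list directly with an index and an inner loop that finds each run's end, emitting each part immediately.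
import Mathlib
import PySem

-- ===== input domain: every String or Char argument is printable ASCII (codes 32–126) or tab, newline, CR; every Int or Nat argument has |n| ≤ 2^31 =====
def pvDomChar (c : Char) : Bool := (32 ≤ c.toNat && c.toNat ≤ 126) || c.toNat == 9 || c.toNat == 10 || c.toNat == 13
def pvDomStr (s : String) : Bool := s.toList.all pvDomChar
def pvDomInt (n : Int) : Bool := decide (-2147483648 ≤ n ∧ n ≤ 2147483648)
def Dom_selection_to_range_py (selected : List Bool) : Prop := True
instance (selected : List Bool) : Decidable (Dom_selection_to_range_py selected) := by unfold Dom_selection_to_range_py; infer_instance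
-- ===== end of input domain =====

-- B replaces A's pages-list + start/end state machine by a direct indexed scan over the
-- booleans with an inner run-end search (alternative decomposition, same O(n) cost).

-- ===== PORT A =====
-- pages = [i + 1 for i, s in enumerate(selected) if s]
-- if not pages: return ""; start = end = pages[0]; loop over pages[1:]; final flush; ", ".join
def selection_to_range_py (selected : List Bool) : String :=
  let pages : List Int :=
    ((PySem.List.enumerate selected 0).filter (fun p => p.2)).map (fun p => p.1 + 1)
  if pages = [] then ""
  else
    let p0 := PySem.List.pyGetD pages 0 0   -- pages[0] (nonempty here, so in range)
    let rest := pages.drop 1                -- pages[1:]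
    let st := rest.foldl
      (fun (acc : List String × Int × Int) p =>
        if p = acc.2.2 + 1 then (acc.1, acc.2.1, p)
        else (acc.1 ++ [if acc.2.1 = acc.2.2 then PySem.Int.toStr acc.2.1
                        else PySem.Int.toStr acc.2.1 ++ "-" ++ PySem.Int.toStr acc.2.2], p, p))
      ([], p0, p0)
    PySem.Str.join ", "
      (st.1 ++ [if st.2.1 = st.2.2 then PySem.Int.toStr st.2.1
                else PySem.Int.toStr st.2.1 ++ "-" ++ PySem.Int.toStr st.2.2])

-- ===== PORT B =====
-- inner while: 'j = i + 1; while j < n and selected[j]: j += 1'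
-- (selected[j] is always in range here, so List.getD is exact; fuel only makes the
--  while-loops structurally total — it is ample, so the computation is unchanged)
def pvAltRunEnd (fuel : Nat) (sel : List Bool) (j : Nat) : Nat :=
  match fuel with
  | 0 => j
  | fuel + 1 => if j < sel.length ∧ sel.getD j false then pvAltRunEnd fuel sel (j + 1) else j

-- outer while over the index i, appending a part per run
def pvAltLoop (fuel : Nat) (sel : List Bool) (i : Nat) (parts : List String) : List String :=
  match fuel with
  | 0 => parts
  | fuel + 1 =>
    if i < sel.length then
      if sel.getD i false then
        let j := pvAltRunEnd sel.length sel (i + 1)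
        pvAltLoop fuel sel j
          (parts ++ [if j = i + 1 then PySem.Int.toStr ((i : Int) + 1)
                     else PySem.Int.toStr ((i : Int) + 1) ++ "-" ++ PySem.Int.toStr (j : Int)])
      else pvAltLoop fuel sel (i + 1) parts
    else parts

def selection_to_range_py_alt (selected : List Bool) : String :=
  PySem.Str.join ", " (pvAltLoop (selected.length + 1) selected 0 [])

-- ===== PRECONDITION & SPEC =====
def Spec_selection_to_range_py (selected : List Bool) (out : String) : Prop := out = selection_to_range_py_alt selected
instance (selected : List Bool) (out : String) : Decidable (Spec_selection_to_range_py selected out) := by unfold Spec_selection_to_range_py; infer_instance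

-- ===== CLAIM (what is proved, stated in full; the proofs are below) =====
def Claim_equal_selection_to_range_py : Prop := ∀ (selected : List Bool), Dom_selection_to_range_py selected → Spec_selection_to_range_py selected (selection_to_range_py selected)

-- ===== LEMMAS AND PROOFS =====

-- ghost helpers used only by the proofs
def pvFmt (s e : Int) : String :=
  if s = e then PySem.Int.toStr s else PySem.Int.toStr s ++ "-" ++ PySem.Int.toStr e

-- the selected page numbers of sel, numbered from pos
def pvPages : List Bool → Int → List Int
  | [], _ => []
  | b :: t, pos => if b then pos :: pvPages t (pos + 1) else pvPages t (pos + 1)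

theorem pvPages_nil (pos : Int) : pvPages [] pos = [] := rfl
theorem pvPages_false (t : List Bool) (pos : Int) :
    pvPages (false :: t) pos = pvPages t (pos + 1) := by simp [pvPages]
theorem pvPages_true (t : List Bool) (pos : Int) :
    pvPages (true :: t) pos = pos :: pvPages t (pos + 1) := by simp [pvPages]

-- number of leading trues
def pvLead : List Bool → Nat
  | true :: t => pvLead t + 1
  | _ => 0

theorem pvLead_nil : pvLead [] = 0 := rfl
theorem pvLead_false (t : List Bool) : pvLead (false :: t) = 0 := rfl
theorem pvLead_true (t : List Bool) : pvLead (true :: t) = pvLead t + 1 := rfl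

-- run-splitting rendering, structurally (what pvAltLoop computes, list-side)
def pvGo : List Bool → Int → List String
  | [], _ => []
  | false :: t, pos => pvGo t (pos + 1)
  | true :: t, pos =>
    pvFmt pos (pos + pvLead t) :: pvGo (t.drop (pvLead t)) (pos + 1 + pvLead t)
termination_by bs _ => bs.length
decreasing_by
  · simp
  · rw [List.length_drop]
    simp only [List.length_cons]
    omega

theorem pvGo_nil (pos : Int) : pvGo [] pos = [] := by rw [pvGo.eq_def]
theorem pvGo_false (t : List Bool) (pos : Int) :
    pvGo (false :: t) pos = pvGo t (pos + 1) := by rw [pvGo.eq_def]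
theorem pvGo_true (t : List Bool) (pos : Int) :
    pvGo (true :: t) pos
      = pvFmt pos (pos + pvLead t) :: pvGo (t.drop (pvLead t)) (pos + 1 + pvLead t) := by
  rw [pvGo.eq_def]

-- rendering with an open run started at s, current position pos
def pvGoOpen (s : Int) : List Bool → Int → List String
  | [], pos => [pvFmt s (pos - 1)]
  | true :: t, pos => pvGoOpen s t (pos + 1)
  | false :: t, pos => pvFmt s (pos - 1) :: pvGo t (pos + 1)

theorem pvGoOpen_nil (s pos : Int) : pvGoOpen s [] pos = [pvFmt s (pos - 1)] := rfl
theorem pvGoOpen_true (s : Int) (t : List Bool) (pos : Int) :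
    pvGoOpen s (true :: t) pos = pvGoOpen s t (pos + 1) := rfl
theorem pvGoOpen_false (s : Int) (t : List Bool) (pos : Int) :
    pvGoOpen s (false :: t) pos = pvFmt s (pos - 1) :: pvGo t (pos + 1) := rfl

-- A's ranges list as a function of (start, end, remaining pages), including the final flush
def pvFl : Int → Int → List Int → List String
  | s, e, [] => [pvFmt s e]
  | s, e, p :: ps => if p = e + 1 then pvFl s p ps else pvFmt s e :: pvFl p p ps

theorem pvFl_nil (s e : Int) : pvFl s e [] = [pvFmt s e] := rfl
theorem pvFl_cons (s e p : Int) (ps : List Int) :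
    pvFl s e (p :: ps) = if p = e + 1 then pvFl s p ps else pvFmt s e :: pvFl p p ps := rfl

theorem pvFold_eq (rest : List Int) : ∀ (ranges : List String) (s e : Int),
    (rest.foldl
      (fun (acc : List String × Int × Int) p =>
        if p = acc.2.2 + 1 then (acc.1, acc.2.1, p)
        else (acc.1 ++ [if acc.2.1 = acc.2.2 then PySem.Int.toStr acc.2.1
                        else PySem.Int.toStr acc.2.1 ++ "-" ++ PySem.Int.toStr acc.2.2], p, p))
      (ranges, s, e)).1
    ++ [if (rest.foldl
      (fun (acc : List String × Int × Int) p =>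
        if p = acc.2.2 + 1 then (acc.1, acc.2.1, p)
        else (acc.1 ++ [if acc.2.1 = acc.2.2 then PySem.Int.toStr acc.2.1
                        else PySem.Int.toStr acc.2.1 ++ "-" ++ PySem.Int.toStr acc.2.2], p, p))
      (ranges, s, e)).2.1 = (rest.foldl
      (fun (acc : List String × Int × Int) p =>
        if p = acc.2.2 + 1 then (acc.1, acc.2.1, p)
        else (acc.1 ++ [if acc.2.1 = acc.2.2 then PySem.Int.toStr acc.2.1
                        else PySem.Int.toStr acc.2.1 ++ "-" ++ PySem.Int.toStr acc.2.2], p, p))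
      (ranges, s, e)).2.2
        then PySem.Int.toStr (rest.foldl
      (fun (acc : List String × Int × Int) p =>
        if p = acc.2.2 + 1 then (acc.1, acc.2.1, p)
        else (acc.1 ++ [if acc.2.1 = acc.2.2 then PySem.Int.toStr acc.2.1
                        else PySem.Int.toStr acc.2.1 ++ "-" ++ PySem.Int.toStr acc.2.2], p, p))
      (ranges, s, e)).2.1
        else PySem.Int.toStr (rest.foldl
      (fun (acc : List String × Int × Int) p =>
        if p = acc.2.2 + 1 then (acc.1, acc.2.1, p)
        else (acc.1 ++ [if acc.2.1 = acc.2.2 then PySem.Int.toStr acc.2.1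
                        else PySem.Int.toStr acc.2.1 ++ "-" ++ PySem.Int.toStr acc.2.2], p, p))
      (ranges, s, e)).2.1 ++ "-" ++ PySem.Int.toStr (rest.foldl
      (fun (acc : List String × Int × Int) p =>
        if p = acc.2.2 + 1 then (acc.1, acc.2.1, p)
        else (acc.1 ++ [if acc.2.1 = acc.2.2 then PySem.Int.toStr acc.2.1
                        else PySem.Int.toStr acc.2.1 ++ "-" ++ PySem.Int.toStr acc.2.2], p, p))
      (ranges, s, e)).2.2]
    = ranges ++ pvFl s e rest := by
  induction rest with
  | nil => intro ranges s e; simp [pvFl_nil, pvFmt]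
  | cons p ps ih =>
    intro ranges s e
    simp only [List.foldl_cons, pvFl_cons]
    by_cases h : p = e + 1
    · simp only [if_pos h]; exact ih ranges s p
    · simp only [if_neg h]
      rw [ih (ranges ++ [if s = e then PySem.Int.toStr s
            else PySem.Int.toStr s ++ "-" ++ PySem.Int.toStr e]) p p]
      simp [pvFmt]

theorem pvPages_eq (sel : List Bool) : ∀ (s : Int),
    ((PySem.List.enumerate sel s).filter (fun p => p.2)).map (fun p => p.1 + 1)
      = pvPages sel (s + 1) := by
  induction sel with
  | nil => intro s; simp [PySem.List.enumerate_nil, pvPages_nil]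
  | cons b t ih =>
    intro s
    rw [PySem.List.enumerate_cons]
    cases b with
    | false =>
      rw [pvPages_false]
      simpa using ih (s + 1)
    | true =>
      rw [pvPages_true]
      simp only [List.filter_cons]
      simpa using ih (s + 1)

theorem pvGo_empty (sel : List Bool) : ∀ pos, pvPages sel pos = [] → pvGo sel pos = [] := by
  induction sel with
  | nil => intro pos _; exact pvGo_nil pos
  | cons b t ih =>
    intro pos h
    cases b with
    | false =>
      rw [pvPages_false] at h
      rw [pvGo_false]
      exact ih (pos + 1) h
    | true => rw [pvPages_true] at h; cases h

-- pvGoOpen closes its run after pvLead more trues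
theorem pvGoOpen_eq (t : List Bool) : ∀ (s q : Int),
    pvGoOpen s t q = pvFmt s (q - 1 + pvLead t) :: pvGo (t.drop (pvLead t)) (q + pvLead t) := by
  induction t with
  | nil => intro s q; simp [pvGoOpen_nil, pvLead_nil, pvGo_nil]
  | cons b t ih =>
    intro s q
    cases b with
    | false =>
      rw [pvGoOpen_false, pvLead_false]
      push_cast
      simp [pvGo_false]
    | true =>
      rw [pvGoOpen_true, ih s (q + 1), pvLead_true, List.drop_succ_cons]
      push_cast
      rw [show q + 1 - 1 + (pvLead t : Int) = q - 1 + ((pvLead t : Int) + 1) from by ring,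
          show q + 1 + (pvLead t : Int) = q + ((pvLead t : Int) + 1) from by ring]

-- the core: pvFl over pvPages is pvGo / pvGoOpen
theorem pvMain (sel : List Bool) :
    (∀ (pos s e : Int), e + 1 < pos → pvFl s e (pvPages sel pos) = pvFmt s e :: pvGo sel pos)
    ∧ (∀ (pos s : Int), pvFl s (pos - 1) (pvPages sel pos) = pvGoOpen s sel pos) := by
  induction sel with
  | nil =>
    constructor
    · intro pos s e _; rw [pvPages_nil, pvFl_nil, pvGo_nil]
    · intro pos s; rw [pvPages_nil, pvFl_nil, pvGoOpen_nil]
  | cons b t ih =>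
    obtain ⟨ih1, ih2⟩ := ih
    constructor
    · intro pos s e h
      cases b with
      | false =>
        rw [pvPages_false, pvGo_false]
        exact ih1 (pos + 1) s e (by omega)
      | true =>
        rw [pvPages_true, pvFl_cons, if_neg (by omega), pvGo_true]
        have h2 := ih2 (pos + 1) pos
        rw [show pos + 1 - 1 = pos from by ring] at h2
        rw [h2, pvGoOpen_eq]
        rw [show pos + 1 - 1 + (pvLead t : Int) = pos + (pvLead t : Int) from by ring]
    · intro pos s
      cases b with
      | false =>
        rw [pvPages_false, pvGoOpen_false]
        exact ih1 (pos + 1) s (pos - 1) (by omega)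
      | true =>
        rw [pvPages_true, pvFl_cons, if_pos (show pos = pos - 1 + 1 from by ring), pvGoOpen_true]
        have h2 := ih2 (pos + 1) s
        rw [show pos + 1 - 1 = pos from by ring] at h2
        exact h2

theorem pvTop (sel : List Bool) : ∀ (pos p0 : Int) (rest : List Int),
    pvPages sel pos = p0 :: rest → pvGo sel pos = pvFl p0 p0 rest := by
  induction sel with
  | nil => intro pos p0 rest h; rw [pvPages_nil] at h; cases h
  | cons b t ih =>
    intro pos p0 rest h
    cases b with
    | false =>
      rw [pvPages_false] at h
      rw [pvGo_false]
      exact ih (pos + 1) p0 rest h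
    | true =>
      rw [pvPages_true] at h
      injection h with h1 h2
      subst h1
      have h2' := (pvMain t).2 (pos + 1) pos
      rw [show pos + 1 - 1 = pos from by ring] at h2'
      rw [pvGo_true, ← h2, h2', pvGoOpen_eq,
          show pos + 1 - 1 + (pvLead t : Int) = pos + (pvLead t : Int) from by ring]

-- B's index loops, read off against the ghost structural versions
theorem pvAltRunEnd_ge (sel : List Bool) : ∀ (fuel j : Nat), j ≤ pvAltRunEnd fuel sel j := by
  intro fuel
  induction fuel with
  | zero => intro j; simp [pvAltRunEnd]
  | succ fuel ih =>
    intro j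
    rw [pvAltRunEnd]
    split_ifs with h
    · have := ih (j + 1); omega
    · omega

theorem pvAltRunEnd_eq (sel : List Bool) : ∀ (fuel j : Nat), sel.length ≤ j + fuel →
    pvAltRunEnd fuel sel j = j + pvLead (sel.drop j) := by
  intro fuel
  induction fuel with
  | zero =>
    intro j hf
    rw [pvAltRunEnd, List.drop_eq_nil_of_le (by omega), pvLead_nil]
    omega
  | succ fuel ih =>
    intro j hf
    rw [pvAltRunEnd]
    split_ifs with h
    · obtain ⟨hlt, hget⟩ := h
      have hst : sel[j] = true := by
        rw [List.getD, List.getElem?_eq_getElem hlt] at hget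
        simpa using hget
      have hd : sel.drop j = true :: sel.drop (j + 1) := by
        rw [List.drop_eq_getElem_cons hlt, hst]
      rw [ih (j + 1) (by omega), hd, pvLead_true]
      omega
    · rcases Nat.lt_or_ge j sel.length with hlt | hge
      · have hget : sel.getD j false = false := by
          cases hG : sel.getD j false with
          | false => rfl
          | true => exact absurd ⟨hlt, hG⟩ h
        have hst : sel[j] = false := by
          rw [List.getD, List.getElem?_eq_getElem hlt] at hget
          simpa using hget
        have hd : sel.drop j = false :: sel.drop (j + 1) := by
          rw [List.drop_eq_getElem_cons hlt, hst]
        rw [hd, pvLead_false]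
        omega
      · rw [List.drop_eq_nil_of_le hge, pvLead_nil]
        omega

theorem pvAltLoop_eq (sel : List Bool) : ∀ (fuel i : Nat) (parts : List String),
    sel.length ≤ i + fuel →
    pvAltLoop fuel sel i parts = parts ++ pvGo (sel.drop i) ((i : Int) + 1) := by
  intro fuel
  induction fuel with
  | zero =>
    intro i parts hf
    rw [pvAltLoop, List.drop_eq_nil_of_le (by omega), pvGo_nil, List.append_nil]
  | succ fuel ih =>
    intro i parts hf
    rw [pvAltLoop]
    split_ifs with hlt hget
    · -- selected[i] is true: one whole run
      have hst : sel[i] = true := by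
        rw [List.getD, List.getElem?_eq_getElem hlt] at hget
        simpa using hget
      have hd : sel.drop i = true :: sel.drop (i + 1) := by
        rw [List.drop_eq_getElem_cons hlt, hst]
      have hj : pvAltRunEnd sel.length sel (i + 1)
          = i + 1 + pvLead (sel.drop (i + 1)) := pvAltRunEnd_eq sel sel.length (i + 1) (by omega)
      have hge := pvAltRunEnd_ge sel sel.length (i + 1)
      rw [ih (pvAltRunEnd sel.length sel (i + 1)) _ (by omega), hj]
      have hdj : sel.drop (i + 1 + pvLead (sel.drop (i + 1)))
          = (sel.drop (i + 1)).drop (pvLead (sel.drop (i + 1))) := by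
        rw [List.drop_drop]
      have hpart : (if i + 1 + pvLead (sel.drop (i + 1)) = i + 1 then PySem.Int.toStr ((i : Int) + 1)
                    else PySem.Int.toStr ((i : Int) + 1) ++ "-" ++ PySem.Int.toStr ((i + 1 + pvLead (sel.drop (i + 1)) : Nat) : Int))
          = pvFmt ((i : Int) + 1) ((i : Int) + 1 + pvLead (sel.drop (i + 1))) := by
        unfold pvFmt
        by_cases hk0 : pvLead (sel.drop (i + 1)) = 0
        · rw [if_pos (by omega), if_pos (by rw [hk0]; simp)]
        · rw [if_neg (by omega), if_neg (by omega)]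
          push_cast
          ring_nf
      rw [hpart, hd, pvGo_true, hdj,
          show ((i + 1 + pvLead (sel.drop (i + 1)) : Nat) : Int) + 1
              = (i : Int) + 1 + 1 + pvLead (sel.drop (i + 1)) from by push_cast; ring]
      simp
    · -- selected[i] is false: skip
      have hgf : sel.getD i false = false := by simpa using hget
      have hst : sel[i] = false := by
        rw [List.getD, List.getElem?_eq_getElem hlt] at hgf
        simpa using hgf
      have hd : sel.drop i = false :: sel.drop (i + 1) := by
        rw [List.drop_eq_getElem_cons hlt, hst]
      rw [ih (i + 1) parts (by omega), hd, pvGo_false,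
          show ((i + 1 : Nat) : Int) + 1 = (i : Int) + 1 + 1 from by push_cast; ring]
    · rw [List.drop_eq_nil_of_le (by omega), pvGo_nil, List.append_nil]

theorem pvJoin_nil : PySem.Str.join ", " [] = "" := by decide

-- ===== VERDICT (by name: the statement is the Claim_ definition above) =====
theorem selection_to_range_py_spec : Claim_equal_selection_to_range_py := by
  intro sel _
  unfold Spec_selection_to_range_py selection_to_range_py selection_to_range_py_alt
  rw [pvAltLoop_eq sel (sel.length + 1) 0 [] (by omega)]
  simp only [List.drop_zero, List.nil_append, Nat.cast_zero, zero_add]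
  have hp : ((PySem.List.enumerate sel 0).filter (fun p => p.2)).map (fun p => p.1 + 1)
      = pvPages sel 1 := by
    have h := pvPages_eq sel 0
    norm_num at h
    exact h
  cases hC : pvPages sel 1 with
  | nil =>
    rw [pvGo_empty sel 1 hC, pvJoin_nil]
    simp only [hp, hC]
    simp
  | cons p0 rest =>
    simp only [hp, hC]
    rw [if_neg (by simp)]
    rw [pvTop sel 1 p0 rest hC]
    have h0 : PySem.List.pyGetD (p0 :: rest) 0 0 = p0 := by
      simp [PySem.List.pyGetD_ofNat']
    have h1 : (p0 :: rest).drop 1 = rest := rfl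
    rw [h0, h1]
    have hf := pvFold_eq rest [] p0 p0
    rw [List.nil_append] at hf
    rw [hf]
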